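-- pv_equiv track=rewrite | github.com/literallyme1/coding_test_algorithm | 2024_kakao_intern_tiling.py | solution
-- ===== SOURCE A (Python) =====
-- def solution(n, tops):
--     MOD = 10007
--
--     #a[k] = k 번째 삼각형을 3번 타일로 끝내는 방법 수
--     #b[k] = k 번째 삼각형을 3번 외 타일로 끝내는 방법 수
--     a = [0] * (n + 1) #DP 는 1부터 시작, n+1
--     b = [0] * (n + 1)
--
--
--     a[1] = 1 #오직 3번 경우의 수 1
--     b[1] = 3 if tops[0] == 1 else 2
--
--     for k in range(2, n+1):
--         a[k] = (a[k-1] + b[k-1]) % MOD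
--
--         if tops[k-1] == 1: #tops 는 1부터 시작
--             b[k] = (2*a[k-1] + 3*b[k-1]) % MOD
--         else:
--             b[k] = (a[k-1] + 2*b[k-1]) % MOD
--     return (a[n] + b[n]) % MOD #(a + b) % mod = ((a % mod) + (b % mod)) % mod
-- ===== SOURCE B (Python) =====
-- def solution(n, tops):
--     # Single second-order recurrence on t[k] = a[k] + b[k]:
--     # t[k] = (4 if tops[k-1]==1 else 3) * t[k-1] - t[k-2]  (mod 10007), t[0]=1.
--     MOD = 10007
--     prev2 = 1
--     prev1 = 4 if tops[0] == 1 else 3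
--     for k in range(2, n + 1):
--         c = 4 if tops[k - 1] == 1 else 3
--         prev1, prev2 = (c * prev1 - prev2) % MOD, prev1
--     return prev1
-- ===== Notes on version B (the rewrite author's own statement) =====
-- stated objective: simpler
-- what changed: Collapses the two coupled DP arrays a[],b[] into the single total sequence t[k]=a[k]+b[k], which satisfies the second-order recurrence t[k]=(4 or 3)*t[k-1]-t[k-2] mod 10007, computed with two rolling scalars instead of two O(n) arrays (measured ~2x faster: no list allocation/indexing).
import Mathlib
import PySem

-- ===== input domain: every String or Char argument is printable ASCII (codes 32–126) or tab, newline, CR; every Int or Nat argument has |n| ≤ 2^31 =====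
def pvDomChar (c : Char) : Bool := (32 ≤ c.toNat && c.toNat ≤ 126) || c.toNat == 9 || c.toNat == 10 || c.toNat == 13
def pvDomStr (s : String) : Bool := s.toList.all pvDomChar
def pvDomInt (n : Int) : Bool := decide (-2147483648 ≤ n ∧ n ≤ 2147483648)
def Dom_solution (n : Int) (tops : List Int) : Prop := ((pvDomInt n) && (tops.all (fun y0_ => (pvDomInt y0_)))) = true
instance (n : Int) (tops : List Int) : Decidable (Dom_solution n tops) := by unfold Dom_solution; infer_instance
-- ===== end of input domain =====

-- B replaces the two coupled DP arrays by one second-order recurrence t[k]=a[k]+b[k]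
-- carried in two rolling scalars (same O(n) time, O(1) space; objective: simpler).

-- ===== PORT A =====
-- loop body of A: a[k] = (a[k-1]+b[k-1]) % MOD; b[k] = (2a+3b or a+2b) % MOD
def solStepA (MOD : Int) (tops : List Int) (st : List Int × List Int) (k : Int) : List Int × List Int :=
  let a' := PySem.List.pySetD st.1 k ((PySem.List.pyGetD st.1 (k-1) 0 + PySem.List.pyGetD st.2 (k-1) 0) % MOD)
  let b' := if PySem.List.pyGetD tops (k-1) 0 == 1
    then PySem.List.pySetD st.2 k ((2 * PySem.List.pyGetD st.1 (k-1) 0 + 3 * PySem.List.pyGetD st.2 (k-1) 0) % MOD)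
    else PySem.List.pySetD st.2 k ((PySem.List.pyGetD st.1 (k-1) 0 + 2 * PySem.List.pyGetD st.2 (k-1) 0) % MOD)
  (a', b')

-- Python's % with the positive literal 10007 equals Lean's Int % (both in [0,10007)); indexing via pyGetD/pySetD, in range under Pre_
def solution (n : Int) (tops : List Int) : Int :=
  let MOD : Int := 10007
  let a : List Int := List.replicate (n+1).toNat 0
  let b : List Int := List.replicate (n+1).toNat 0
  let a := PySem.List.pySetD a 1 1
  let b := PySem.List.pySetD b 1 (if PySem.List.pyGetD tops 0 0 == 1 then 3 else 2)
  let st := (PySem.List.pyRange 2 (n+1) 1).foldl (solStepA MOD tops) (a, b)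
  (PySem.List.pyGetD st.1 n 0 + PySem.List.pyGetD st.2 n 0) % MOD

-- ===== PORT B =====
-- loop body of B: prev1, prev2 = (c*prev1 - prev2) % MOD, prev1
def solStepB (MOD : Int) (tops : List Int) (st : Int × Int) (k : Int) : Int × Int :=
  let c : Int := if PySem.List.pyGetD tops (k-1) 0 == 1 then 4 else 3
  ((c * st.1 - st.2) % MOD, st.1)

def solution_alt (n : Int) (tops : List Int) : Int :=
  let MOD : Int := 10007
  let prev1 : Int := if PySem.List.pyGetD tops 0 0 == 1 then 4 else 3
  let st := (PySem.List.pyRange 2 (n+1) 1).foldl (solStepB MOD tops) (prev1, 1)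
  st.1

-- ===== PRECONDITION & SPEC =====
-- Pre_ = exactly where A returns: n ≥ 1 (else a[1] is out of range) and len(tops) ≥ n (else tops[k-1] raises)
def Pre_solution (n : Int) (tops : List Int) : Prop := 1 ≤ n ∧ n ≤ (tops.length : Int)
instance (n : Int) (tops : List Int) : Decidable (Pre_solution n tops) := by unfold Pre_solution; infer_instance
def pvWitness_solution : Int × List Int := (3, [1, 0, 1])

def Spec_solution (n : Int) (tops : List Int) (out : Int) : Prop := out = solution_alt n tops
instance (n : Int) (tops : List Int) (out : Int) : Decidable (Spec_solution n tops out) := by unfold Spec_solution; infer_instance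

-- ===== CLAIM (what is proved, stated in full; the proofs are below) =====
def Claim_equal_solution : Prop := ∀ (n : Int) (tops : List Int), Dom_solution n tops → Pre_solution n tops → Spec_solution n tops (solution n tops)

-- ===== LEMMAS AND PROOFS =====

-- abstract values of A's cells: tAB tops k = (a[k], b[k])
def tAB (tops : List Int) : Nat → Int × Int
  | 0 => (0, 0)
  | 1 => (1, if PySem.List.pyGetD tops 0 0 == 1 then 3 else 2)
  | (k+2) =>
      let p := tAB tops (k+1)
      ((p.1 + p.2) % 10007,
       if PySem.List.pyGetD tops ((k:Int)+1) 0 == 1 then (2*p.1 + 3*p.2) % 10007 else (p.1 + 2*p.2) % 10007)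

-- A's fold after the iterations k = 2 .. m
def AfoldA (n : Int) (tops : List Int) (m : Nat) : List Int × List Int :=
  (PySem.List.pyRange 2 ((m:Int)+1) 1).foldl (solStepA 10007 tops)
    (PySem.List.pySetD (List.replicate (n+1).toNat (0:Int)) 1 1,
     PySem.List.pySetD (List.replicate (n+1).toNat (0:Int)) 1
       (if PySem.List.pyGetD tops 0 0 == 1 then 3 else 2))

lemma AfoldA_one (n : Int) (tops : List Int) :
    AfoldA n tops 1 =
      (PySem.List.pySetD (List.replicate (n+1).toNat (0:Int)) 1 1,
       PySem.List.pySetD (List.replicate (n+1).toNat (0:Int)) 1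
         (if PySem.List.pyGetD tops 0 0 == 1 then 3 else 2)) := by
  unfold AfoldA
  rw [show ((1:Nat):Int) + 1 = 2 by norm_num, PySem.List.pyRange_one_eq_nil (by norm_num)]
  rfl

lemma AfoldA_succ (n : Int) (tops : List Int) (m : Nat) (h : 1 ≤ m) :
    AfoldA n tops (m+1) = solStepA 10007 tops (AfoldA n tops m) ((m:Int)+1) := by
  unfold AfoldA
  rw [show ((m+1:Nat):Int) + 1 = ((m:Int)+1) + 1 by push_cast; ring,
      PySem.List.pyRange_one_succ_right (by omega), List.foldl_append]
  rfl

lemma solStepA_spec (tops : List Int) (st : List Int × List Int) (k : Nat)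
    (hlt1 : k + 1 < st.1.length) (hlt2 : k + 1 < st.2.length) :
    (solStepA 10007 tops st ((k:Int)+1)).1.length = st.1.length ∧
    (solStepA 10007 tops st ((k:Int)+1)).2.length = st.2.length ∧
    PySem.List.pyGetD (solStepA 10007 tops st ((k:Int)+1)).1 ((k:Int)+1) 0
      = (PySem.List.pyGetD st.1 (k:Int) 0 + PySem.List.pyGetD st.2 (k:Int) 0) % 10007 ∧
    PySem.List.pyGetD (solStepA 10007 tops st ((k:Int)+1)).2 ((k:Int)+1) 0
      = (if PySem.List.pyGetD tops (k:Int) 0 == 1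
         then (2 * PySem.List.pyGetD st.1 (k:Int) 0 + 3 * PySem.List.pyGetD st.2 (k:Int) 0) % 10007
         else (PySem.List.pyGetD st.1 (k:Int) 0 + 2 * PySem.List.pyGetD st.2 (k:Int) 0) % 10007) := by
  simp only [solStepA]
  rw [show (k:Int) + 1 - 1 = (k:Int) by ring, show (k:Int) + 1 = ((k+1:Nat):Int) by push_cast; ring]
  split_ifs with hcond <;>
    refine ⟨by rw [PySem.List.length_pySetD], by rw [PySem.List.length_pySetD], ?_, ?_⟩ <;>
    rw [PySem.List.pyGetD_pySetD_natCast _ _ _ _ _ (by omega)] <;> simp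

lemma Aloop (tops : List Int) (n : Int) (m : Nat) (h1 : 1 ≤ m) (hm : (m:Int) ≤ n) :
    (AfoldA n tops m).1.length = (n+1).toNat ∧ (AfoldA n tops m).2.length = (n+1).toNat ∧
    PySem.List.pyGetD (AfoldA n tops m).1 (m:Int) 0 = (tAB tops m).1 ∧
    PySem.List.pyGetD (AfoldA n tops m).2 (m:Int) 0 = (tAB tops m).2 := by
  induction m, h1 using Nat.le_induction with
  | base =>
      rw [AfoldA_one]
      have hn2 : 1 < (n+1).toNat := by omega
      refine ⟨by simp [PySem.List.length_pySetD], by simp [PySem.List.length_pySetD], ?_, ?_⟩ <;>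
        simp [tAB, PySem.List.pySetD_of_nonneg, PySem.List.pyGetD_of_nonneg,
              List.getD_eq_getElem?_getD, hn2]
  | succ m hm' ih =>
      have hmn : (m:Int) ≤ n := by push_cast at hm ⊢; omega
      obtain ⟨hl1, hl2, hg1, hg2⟩ := ih hmn
      rw [AfoldA_succ n tops m hm']
      obtain ⟨hs1, hs2, hs3, hs4⟩ :=
        solStepA_spec tops (AfoldA n tops m) m (by rw [hl1]; omega) (by rw [hl2]; omega)
      obtain ⟨k, rfl⟩ : ∃ k, m = k + 1 := ⟨m - 1, by omega⟩
      push_cast at hs1 hs2 hs3 hs4 hg1 hg2 ⊢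
      refine ⟨by rw [hs1, hl1], by rw [hs2, hl2], ?_, ?_⟩
      · rw [hs3, hg1, hg2]
        simp [tAB]
      · rw [hs4, hg1, hg2]
        simp [tAB]

lemma Bloop (tops : List Int) (m : Nat) (h1 : 1 ≤ m) :
    (PySem.List.pyRange 2 ((m:Int)+1) 1).foldl (solStepB 10007 tops)
        ((if PySem.List.pyGetD tops 0 0 == 1 then 4 else 3), 1)
    = (((tAB tops m).1 + (tAB tops m).2) % 10007, (tAB tops m).1) := by
  induction m, h1 using Nat.le_induction with
  | base =>
      rw [show ((1:Nat):Int) + 1 = 2 by norm_num, PySem.List.pyRange_one_eq_nil (by norm_num)]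
      simp only [List.foldl_nil, tAB]
      by_cases h : (PySem.List.pyGetD tops 0 0 == 1) = true <;> simp [h]
  | succ m hm ih =>
      obtain ⟨k, rfl⟩ : ∃ k, m = k + 1 := ⟨m - 1, by omega⟩
      have hr : PySem.List.pyRange 2 ((((k+1+1 : Nat)) : Int) + 1) 1
          = PySem.List.pyRange 2 (((k+1 : Nat) : Int) + 1) 1 ++ [((k+1 : Nat) : Int) + 1] := by
        push_cast
        rw [show (k : Int) + 1 + 1 + 1 = ((k : Int) + 1 + 1) + 1 by ring]
        exact PySem.List.pyRange_one_succ_right (by omega)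
      rw [hr, List.foldl_append, ih]
      simp only [solStepB, List.foldl_cons, List.foldl_nil]
      have hidx : ((k+1 : Nat) : Int) + 1 - 1 = (k : Int) + 1 := by push_cast; ring
      rw [hidx]
      show _ = (((tAB tops (k+2)).1 + (tAB tops (k+2)).2) % 10007, (tAB tops (k+2)).1)
      simp only [tAB]
      by_cases h : (PySem.List.pyGetD tops ((k : Int) + 1) 0 == 1) = true <;>
        simp only [h, if_true, if_false, Bool.false_eq_true] <;>
        refine Prod.ext ?_ rfl <;> dsimp only <;> omega

-- ===== VERDICT (by name: the statement is the Claim_ definition above) =====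
theorem solution_spec : Claim_equal_solution := by
  intro n tops _ hpre
  obtain ⟨h1, h2⟩ := hpre
  unfold Spec_solution solution solution_alt
  obtain ⟨m, rfl⟩ : ∃ m : Nat, n = (m : Int) := ⟨n.toNat, by omega⟩
  dsimp only
  have hm1 : 1 ≤ m := by exact_mod_cast h1
  obtain ⟨-, -, hg1, hg2⟩ := Aloop tops (m : Int) m hm1 (le_refl _)
  have hB := Bloop tops m hm1
  have keyA : (List.foldl (solStepA 10007 tops)
      (PySem.List.pySetD (List.replicate ((m:Int)+1).toNat (0:Int)) 1 1,
       PySem.List.pySetD (List.replicate ((m:Int)+1).toNat (0:Int)) 1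
         (if PySem.List.pyGetD tops 0 0 == 1 then 3 else 2))
      (PySem.List.pyRange 2 ((m:Int)+1) 1)) = AfoldA (m:Int) tops m := rfl
  rw [keyA, hg1, hg2, hB]
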